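-- pv_equiv track=rewrite | github.com/LiamSheldonn/6.101 | sat/lab.py | all_n_lengths
-- ===== SOURCE A (Python) =====
-- def all_n_lengths(collection, n):
--     """
--     Returns all combinations of length n from a collection.
--     """
--
--     if n == 0:
--         return [()]
--     if not collection:
--         return []
--     first = collection[0]
--     rest = collection[1:]
--     rest_smaller_combos = all_n_lengths(rest, n - 1)
--     first_combos = [(first,) + item for item in rest_smaller_combos]
--
--     rest_combos = all_n_lengths(rest, n)
--
--     return first_combos + rest_combos
-- ===== SOURCE B (Python) =====
-- def all_n_lengths(collection, n):
--     """
--     Returns all combinations of length n from a collection.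
--
--     Bottom-up dynamic programming over suffixes: row[k] holds all
--     length-k combinations of the current suffix, built from the
--     shorter suffix's row, so no subproblem is ever recomputed.
--     """
--     if n == 0:
--         return [()]
--     m = len(collection)
--     if n < 0 or n > m:
--         return []
--     # row for the empty suffix: one empty combo at k == 0, none otherwise
--     row = [[()]] + [[] for _ in range(n)]
--     for i in range(m - 1, -1, -1):
--         x = collection[i]
--         new = [[()]]
--         for k in range(1, n + 1):
--             new.append([(x,) + t for t in row[k - 1]] + row[k])
--         row = new
--     return row[n]
-- ===== Notes on version B (the rewrite author's own statement) =====
-- stated objective: alternative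
-- what changed: Replaced the naive double recursion by a bottom-up dynamic-programming table over suffixes holding all combinations of each length 0..n, so each (suffix, length) subproblem is built once; same index-lexicographic output order (output size dominates on large inputs, so no measured speedup).
import Mathlib
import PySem

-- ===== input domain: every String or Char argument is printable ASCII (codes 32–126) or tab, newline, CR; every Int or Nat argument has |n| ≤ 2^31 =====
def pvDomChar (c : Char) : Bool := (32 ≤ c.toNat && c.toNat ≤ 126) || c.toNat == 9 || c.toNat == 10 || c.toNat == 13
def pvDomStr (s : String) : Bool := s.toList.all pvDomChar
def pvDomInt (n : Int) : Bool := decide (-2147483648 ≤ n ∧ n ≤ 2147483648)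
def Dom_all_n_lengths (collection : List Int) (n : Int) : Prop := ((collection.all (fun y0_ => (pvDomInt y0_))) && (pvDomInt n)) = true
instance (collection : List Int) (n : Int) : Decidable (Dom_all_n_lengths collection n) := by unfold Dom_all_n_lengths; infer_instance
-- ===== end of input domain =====

-- B replaces A's naive double recursion by a bottom-up DP table over suffixes (same output, each subproblem built once).

-- ===== PORT A =====
def all_n_lengths (collection : List Int) (n : Int) : List (List Int) :=
  if n = 0 then [[]]
  else
    match collection with
    | [] => []
    | first :: rest =>
      ((all_n_lengths rest (n - 1)).map (fun item => first :: item)) ++ all_n_lengths rest n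

-- ===== PORT B =====
-- inner loop: for k in range(1, n+1): new.append([(x,)+t for t in row[k-1]] + row[k])
def altStep (x : Int) (nn : Nat) (row : List (List (List Int))) : List (List (List Int)) :=
  [[]] :: (List.range nn).map (fun k0 =>
    ((row.getD k0 []).map (fun t => x :: t)) ++ row.getD (k0 + 1) [])

def all_n_lengths_alt (collection : List Int) (n : Int) : List (List Int) :=
  if n = 0 then [[]]
  else if n < 0 ∨ n > collection.length then []
  else
    -- for i in range(m-1, -1, -1): reverse traversal of the list = foldr
    (collection.foldr (fun x row => altStep x n.toNat row)
      ([[]] :: List.replicate n.toNat [])).getD n.toNat []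

-- ===== PRECONDITION & SPEC =====
def Spec_all_n_lengths (collection : List Int) (n : Int) (out : List (List Int)) : Prop := out = all_n_lengths_alt collection n
instance (collection : List Int) (n : Int) (out : List (List Int)) : Decidable (Spec_all_n_lengths collection n out) := by unfold Spec_all_n_lengths; infer_instance

-- ===== CLAIM (what is proved, stated in full; the proofs are below) =====
def Claim_equal_all_n_lengths : Prop := ∀ (collection : List Int) (n : Int), Dom_all_n_lengths collection n → Spec_all_n_lengths collection n (all_n_lengths collection n)

-- ===== LEMMAS AND PROOFS =====

theorem A_zero (c : List Int) : all_n_lengths c 0 = [[]] := by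
  cases c <;> simp [all_n_lengths]

theorem A_nil (n : Int) (h : ¬ n = 0) : all_n_lengths [] n = [] := by
  simp [all_n_lengths, h]

theorem A_cons (x : Int) (rest : List Int) (n : Int) (h : ¬ n = 0) :
    all_n_lengths (x :: rest) n =
      ((all_n_lengths rest (n - 1)).map (fun item => x :: item)) ++ all_n_lengths rest n := by
  rw [all_n_lengths, if_neg h]

theorem getD_map_range {α : Type} (f : Nat → α) (M j : Nat) (d : α) (h : j < M) :
    ((List.range M).map f).getD j d = f j := by
  simp [List.getD, h]

theorem A_neg (collection : List Int) (n : Int) (h : n < 0) :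
    all_n_lengths collection n = [] := by
  induction collection generalizing n with
  | nil => exact A_nil n (by omega)
  | cons x rest ih =>
    rw [A_cons x rest n (by omega), ih (n - 1) (by omega), ih n h]
    simp

theorem A_big (collection : List Int) (n : Int) (h : n > collection.length) :
    all_n_lengths collection n = [] := by
  induction collection generalizing n with
  | nil =>
    simp at h
    exact A_nil n (by omega)
  | cons x rest ih =>
    simp at h
    rw [A_cons x rest n (by omega), ih (n - 1) (by omega), ih n (by omega)]
    simp

theorem row_spec (nn : Nat) (collection : List Int) :
    collection.foldr (fun x row => altStep x nn row) ([[]] :: List.replicate nn []) =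
    (List.range (nn + 1)).map (fun k : Nat => all_n_lengths collection (Int.ofNat k)) := by
  induction collection with
  | nil =>
    apply List.ext_getElem
    · simp
    · intro i h1 h2
      simp only [List.foldr_nil, List.length_cons, List.length_replicate] at h1
      match i with
      | 0 => simp [A_zero]
      | j + 1 =>
        have hj : j < nn := by omega
        simp only [List.foldr_nil, List.getElem_cons_succ, List.getElem_replicate,
          List.getElem_map, List.getElem_range]
        exact (A_nil _ (by simp [Int.ofNat_eq_natCast]; omega)).symm
  | cons x rest ih =>
    rw [List.foldr_cons, ih]
    apply List.ext_getElem
    · simp [altStep]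
    · intro i h1 h2
      simp only [altStep, List.length_cons, List.length_map, List.length_range] at h1
      match i with
      | 0 =>
        simp only [altStep, List.getElem_cons_zero, List.getElem_map, List.getElem_range]
        exact (A_zero (x :: rest)).symm
      | j + 1 =>
        have hj : j < nn := by omega
        simp only [altStep, List.getElem_cons_succ, List.getElem_map, List.getElem_range]
        rw [getD_map_range _ _ _ _ (by omega), getD_map_range _ _ _ _ (by omega)]
        rw [A_cons x rest (Int.ofNat (j + 1)) (by simp [Int.ofNat_eq_natCast]; omega)]
        congr 2 <;> simp [Int.ofNat_eq_natCast]

-- ===== VERDICT (by name: the statement is the Claim_ definition above) =====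
theorem all_n_lengths_spec : Claim_equal_all_n_lengths := by
  intro collection n _
  unfold Spec_all_n_lengths all_n_lengths_alt
  by_cases h0 : n = 0
  · rw [if_pos h0, h0, A_zero]
  · rw [if_neg h0]
    by_cases hb : n < 0 ∨ n > collection.length
    · rw [if_pos hb]
      rcases hb with hb | hb
      · exact A_neg collection n hb
      · exact A_big collection n hb
    · rw [if_neg hb]
      rw [not_or, not_lt, not_lt] at hb
      obtain ⟨h1, h2⟩ := hb
      rw [row_spec, getD_map_range _ _ _ _ (by omega)]
      rw [show Int.ofNat n.toNat = n from by rw [Int.ofNat_eq_natCast]; omega]
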